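-- pv_equiv track=rewrite | github.com/ShivamShwaira/Daily-Standup-Slackbot | app/utils/slack_utils.py | unescape_slack_text
-- ===== SOURCE A (Python) =====
-- def unescape_slack_text(text: str) -> str:
--     """Unescape Slack entities.
--
--     Args:
--         text: Slack message text with entities
--
--     Returns:
--         Unescaped text
--     """
--     if not text:
--         return ""
--
--     replacements = {
--         "&lt;": "<",
--         "&gt;": ">",
--         "&amp;": "&",
--     }
--
--     result = text
--     for escaped, char in replacements.items():
--         result = result.replace(escaped, char)
--
--     return result
-- ===== SOURCE B (Python) =====
-- def unescape_slack_text(text: str) -> str: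
--     """Unescape Slack entities in a single left-to-right scan."""
--     if not text:
--         return ""
--     out = []
--     i = 0
--     n = len(text)
--     while i < n:
--         if text.startswith("&lt;", i):
--             out.append("<")
--             i += 4
--         elif text.startswith("&gt;", i):
--             out.append(">")
--             i += 4
--         elif text.startswith("&amp;", i):
--             out.append("&")
--             i += 5
--         else:
--             out.append(text[i])
--             i += 1
--     return "".join(out)
-- ===== Notes on version B (the rewrite author's own statement) =====
-- stated objective: idiomatic
-- what changed: Replaces A's three sequential full-string replace passes with one left-to-right scan that decodes each entity at its position in a single traversal.
import Mathlib
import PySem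

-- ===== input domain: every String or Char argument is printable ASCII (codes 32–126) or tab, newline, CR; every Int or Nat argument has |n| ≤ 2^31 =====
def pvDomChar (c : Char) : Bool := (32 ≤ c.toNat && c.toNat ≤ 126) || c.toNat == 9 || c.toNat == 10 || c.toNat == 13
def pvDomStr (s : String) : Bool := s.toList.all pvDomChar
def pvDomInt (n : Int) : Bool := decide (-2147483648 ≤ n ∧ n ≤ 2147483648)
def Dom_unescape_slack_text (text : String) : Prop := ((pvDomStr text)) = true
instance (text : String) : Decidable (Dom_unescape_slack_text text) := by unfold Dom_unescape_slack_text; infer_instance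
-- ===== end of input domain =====

-- B replaces A's three sequential full-string replace passes with one left-to-right
-- scan that decodes each entity where it stands (single traversal; same O(n) cost).


-- ===== PORT A =====
def unescape_slack_text (text : String) : String :=
  if text = "" then ""
  else
    -- the replacements dict, iterated in insertion order
    ([("&lt;", "<"), ("&gt;", ">"), ("&amp;", "&")] : List (String × String)).foldl
      (fun result p => PySem.Str.replace result p.1 p.2) text

-- ===== PORT B =====
-- B's while loop over index i, as recursion over the characters still to scan
def unescGo : List Char → List Char
  | [] => []
  | c :: t =>
    if ['&', 'l', 't', ';'].isPrefixOf (c :: t) then '<' :: unescGo (t.drop 3)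
    else if ['&', 'g', 't', ';'].isPrefixOf (c :: t) then '>' :: unescGo (t.drop 3)
    else if ['&', 'a', 'm', 'p', ';'].isPrefixOf (c :: t) then '&' :: unescGo (t.drop 4)
    else c :: unescGo t
termination_by l => l.length
decreasing_by all_goals simp [List.length_drop]


def unescape_slack_text_alt (text : String) : String :=
  if text = "" then "" else String.ofList (unescGo text.toList)

-- ===== PRECONDITION & SPEC =====
def Spec_unescape_slack_text (text : String) (out : String) : Prop := out = unescape_slack_text_alt text
instance (text : String) (out : String) : Decidable (Spec_unescape_slack_text text out) := by unfold Spec_unescape_slack_text; infer_instance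

-- ===== CLAIM (what is proved, stated in full; the proofs are below) =====
def Claim_equal_unescape_slack_text : Prop := ∀ (text : String), Dom_unescape_slack_text text → Spec_unescape_slack_text text (unescape_slack_text text)

-- ===== LEMMAS AND PROOFS =====

theorem go_acc (old new : List Char) (fuel : Nat) : ∀ (l acc : List Char),
    PySem.Chars.replace.go old new fuel l acc = acc.reverse ++ PySem.Chars.replace.go old new fuel l [] := by
  induction fuel with
  | zero => intro l acc; simp [PySem.Chars.replace.go]
  | succ fuel ih =>
    intro l acc
    cases l with
    | nil => simp [PySem.Chars.replace.go]
    | cons c t =>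
      rw [PySem.Chars.replace.go]
      conv_rhs => rw [PySem.Chars.replace.go]
      split
      · conv_lhs => rw [ih]
        conv_rhs => rw [ih]
        simp
      · conv_lhs => rw [ih]
        conv_rhs => rw [ih]
        simp

theorem go_fuel_succ (old new : List Char) (hold : old ≠ []) (fuel : Nat) : ∀ (l acc : List Char),
    l.length ≤ fuel →
    PySem.Chars.replace.go old new fuel l acc = PySem.Chars.replace.go old new (fuel + 1) l acc := by
  induction fuel with
  | zero =>
    intro l acc h
    have : l = [] := List.eq_nil_of_length_eq_zero (Nat.le_zero.mp h)
    subst this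
    simp [PySem.Chars.replace.go]
  | succ fuel ih =>
    intro l acc h
    cases l with
    | nil => simp [PySem.Chars.replace.go]
    | cons c t =>
      rw [PySem.Chars.replace.go]
      conv_rhs => rw [PySem.Chars.replace.go]
      split
      · apply ih
        have hk : 1 ≤ old.length := by
          cases old with
          | nil => exact absurd rfl hold
          | cons _ _ => simp
        simp only [List.length_drop, List.length_cons]
        simp only [List.length_cons] at h
        omega
      · apply ih
        simp only [List.length_cons] at h
        omega

theorem go_fuel_add (old new : List Char) (hold : old ≠ []) (m : Nat) : ∀ (fuel : Nat) (l acc : List Char),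
    l.length ≤ fuel →
    PySem.Chars.replace.go old new fuel l acc = PySem.Chars.replace.go old new (fuel + m) l acc := by
  induction m with
  | zero => intro fuel l acc h; rfl
  | succ m ih =>
    intro fuel l acc h
    rw [ih fuel l acc h, go_fuel_succ old new hold (fuel + m) l acc (le_trans h (Nat.le_add_right _ _))]
    rfl

theorem go_fuel_eq (old new : List Char) (hold : old ≠ []) (fuel : Nat) (l acc : List Char)
    (h : l.length ≤ fuel) :
    PySem.Chars.replace.go old new fuel l acc = PySem.Chars.replace.go old new l.length l acc := by
  have h2 := go_fuel_add old new hold (fuel - l.length) l.length l acc (le_refl _)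
  rw [h2]
  congr 1
  omega

theorem replace_nil (old new : List Char) (hold : old ≠ []) :
    PySem.Chars.replace [] old new = [] := by
  rw [PySem.Chars.replace]
  simp [List.isEmpty_iff, hold, PySem.Chars.replace.go]

theorem replace_cons_of_not_prefix (old new : List Char) (hold : old ≠ []) (c : Char) (t : List Char)
    (h : ¬ old.isPrefixOf (c :: t)) :
    PySem.Chars.replace (c :: t) old new = c :: PySem.Chars.replace t old new := by
  rw [PySem.Chars.replace, PySem.Chars.replace]
  simp only [List.isEmpty_iff, hold, if_false, List.length_cons]
  rw [PySem.Chars.replace.go]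
  rw [if_neg h]
  rw [go_acc]
  simp

theorem replace_of_prefix (old new l : List Char) (hold : old ≠ [])
    (h : old.isPrefixOf l) :
    PySem.Chars.replace l old new = new ++ PySem.Chars.replace (l.drop old.length) old new := by
  have hlen : 1 ≤ old.length := by
    cases old with
    | nil => exact absurd rfl hold
    | cons _ _ => simp
  have hpre : old <+: l := List.isPrefixOf_iff_prefix.mp h
  have hll : old.length ≤ l.length := hpre.length_le
  cases l with
  | nil =>
    exfalso
    simp only [List.length_nil] at hll
    omega
  | cons c t =>
    rw [PySem.Chars.replace, PySem.Chars.replace]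
    simp only [List.isEmpty_iff, hold, if_false]
    rw [List.length_cons, PySem.Chars.replace.go]
    rw [if_pos h, go_acc]
    simp only [List.reverse_reverse, List.append_nil]
    congr 1
    exact go_fuel_eq old new hold t.length (List.drop old.length (c :: t)) [] (by
      simp only [List.length_drop, List.length_cons]
      omega)

theorem prefix_replace_iff (old : List Char) (d : Char) (hold : old ≠ []) :
    ∀ (p : List Char), (∀ c ∈ p, c ≠ old.head! ∧ c ≠ d) →
    ∀ (t : List Char),
    p.isPrefixOf (PySem.Chars.replace t old [d]) = p.isPrefixOf t := by
  intro p
  induction p with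
  | nil => intro _ t; simp [List.isPrefixOf]
  | cons a p' ih =>
    intro hp t
    have ha : a ≠ old.head! ∧ a ≠ d := hp a (List.mem_cons_self ..)
    by_cases hpre : old.isPrefixOf t
    · rw [replace_of_prefix old [d] t hold hpre]
      have hhead : ∃ t', t = old.head! :: t' := by
        obtain ⟨r, hr⟩ := List.isPrefixOf_iff_prefix.mp hpre
        cases old with
        | nil => exact absurd rfl hold
        | cons o os => exact ⟨os ++ r, by simp [← hr]⟩
      obtain ⟨t', ht⟩ := hhead
      subst ht
      simp only [List.singleton_append, List.isPrefixOf]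
      rw [beq_eq_false_iff_ne.mpr ha.2, beq_eq_false_iff_ne.mpr ha.1]
      simp
    · cases t with
      | nil => rw [replace_nil old [d] hold]
      | cons c t' =>
        rw [replace_cons_of_not_prefix old [d] hold c t' hpre]
        simp only [List.isPrefixOf]
        by_cases hac : a == c
        · simp only [hac, Bool.true_and]
          exact ih (fun x hx => hp x (List.mem_cons_of_mem _ hx)) t'
        · simp [hac]


-- A's three passes, named, and their composition
def passLT (l : List Char) : List Char := PySem.Chars.replace l ['&', 'l', 't', ';'] ['<']
def passGT (l : List Char) : List Char := PySem.Chars.replace l ['&', 'g', 't', ';'] ['>']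
def passAMP (l : List Char) : List Char := PySem.Chars.replace l ['&', 'a', 'm', 'p', ';'] ['&']
def r3 (l : List Char) : List Char := passAMP (passGT (passLT l))

theorem main_ind (n : Nat) : ∀ (s : List Char), s.length ≤ n → r3 s = unescGo s := by
  induction n with
  | zero =>
    intro s hs
    have : s = [] := List.eq_nil_of_length_eq_zero (Nat.le_zero.mp hs)
    subst this
    simp [r3, passLT, passGT, passAMP, replace_nil, unescGo]
  | succ n ih =>
    intro s hs
    cases s with
    | nil => simp [r3, passLT, passGT, passAMP, replace_nil, unescGo]
    | cons c t =>
      by_cases hlt : (['&', 'l', 't', ';'] : List Char).isPrefixOf (c :: t)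
      · obtain ⟨r, hr⟩ := List.isPrefixOf_iff_prefix.mp hlt
        have hct : c :: t = '&' :: 'l' :: 't' :: ';' :: r := by rw [← hr]; rfl
        rw [hct]
        have h1 : passLT ('&' :: 'l' :: 't' :: ';' :: r) = '<' :: passLT r := by
          rw [passLT, replace_of_prefix _ _ _ (by simp) (by simp [List.isPrefixOf])]
          rfl
        have h2 : passGT ('<' :: passLT r) = '<' :: passGT (passLT r) := by
          rw [passGT, replace_cons_of_not_prefix _ _ (by simp) _ _ (by simp [List.isPrefixOf])]
          rfl
        have h3 : passAMP ('<' :: passGT (passLT r)) = '<' :: passAMP (passGT (passLT r)) := by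
          rw [passAMP, replace_cons_of_not_prefix _ _ (by simp) _ _ (by simp [List.isPrefixOf])]
          rfl
        rw [r3, h1, h2, h3]
        rw [unescGo]
        rw [if_pos (by simp [List.isPrefixOf])]
        have hlen : r.length ≤ n := by
          rw [hct] at hs; simp at hs; omega
        simp only [List.drop_succ_cons, List.drop_zero]
        exact congrArg _ (ih r hlen)
      · by_cases hgt : (['&', 'g', 't', ';'] : List Char).isPrefixOf (c :: t)
        · obtain ⟨r, hr⟩ := List.isPrefixOf_iff_prefix.mp hgt
          have hct : c :: t = '&' :: 'g' :: 't' :: ';' :: r := by rw [← hr]; rfl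
          have hlt' := hlt
          rw [hct] at hlt' hs ⊢
          have h1 : passLT ('&' :: 'g' :: 't' :: ';' :: r) = '&' :: 'g' :: 't' :: ';' :: passLT r := by
            rw [passLT, replace_cons_of_not_prefix _ _ (by simp) _ _ hlt',
                replace_cons_of_not_prefix _ _ (by simp) _ _ (by simp [List.isPrefixOf]),
                replace_cons_of_not_prefix _ _ (by simp) _ _ (by simp [List.isPrefixOf]),
                replace_cons_of_not_prefix _ _ (by simp) _ _ (by simp [List.isPrefixOf])]
            rfl
          have h2 : passGT ('&' :: 'g' :: 't' :: ';' :: passLT r) = '>' :: passGT (passLT r) := by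
            rw [passGT, replace_of_prefix _ _ _ (by simp) (by simp [List.isPrefixOf])]
            rfl
          have h3 : passAMP ('>' :: passGT (passLT r)) = '>' :: passAMP (passGT (passLT r)) := by
            rw [passAMP, replace_cons_of_not_prefix _ _ (by simp) _ _ (by simp [List.isPrefixOf])]
            rfl
          rw [r3, h1, h2, h3]
          rw [unescGo]
          rw [if_neg (by simpa using hlt'), if_pos (by simp [List.isPrefixOf])]
          have hlen : r.length ≤ n := by simp at hs; omega
          simp only [List.drop_succ_cons, List.drop_zero]
          exact congrArg _ (ih r hlen)
        · by_cases hamp : (['&', 'a', 'm', 'p', ';'] : List Char).isPrefixOf (c :: t)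
          · obtain ⟨r, hr⟩ := List.isPrefixOf_iff_prefix.mp hamp
            have hct : c :: t = '&' :: 'a' :: 'm' :: 'p' :: ';' :: r := by rw [← hr]; rfl
            have hlt' := hlt
            have hgt' := hgt
            rw [hct] at hlt' hgt' hs ⊢
            have h1 : passLT ('&' :: 'a' :: 'm' :: 'p' :: ';' :: r) = '&' :: 'a' :: 'm' :: 'p' :: ';' :: passLT r := by
              rw [passLT, replace_cons_of_not_prefix _ _ (by simp) _ _ hlt',
                  replace_cons_of_not_prefix _ _ (by simp) _ _ (by simp [List.isPrefixOf]),
                  replace_cons_of_not_prefix _ _ (by simp) _ _ (by simp [List.isPrefixOf]),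
                  replace_cons_of_not_prefix _ _ (by simp) _ _ (by simp [List.isPrefixOf]),
                  replace_cons_of_not_prefix _ _ (by simp) _ _ (by simp [List.isPrefixOf])]
              rfl
            have h2 : passGT ('&' :: 'a' :: 'm' :: 'p' :: ';' :: passLT r) = '&' :: 'a' :: 'm' :: 'p' :: ';' :: passGT (passLT r) := by
              rw [passGT, replace_cons_of_not_prefix _ _ (by simp) _ _ (by simp [List.isPrefixOf]),
                  replace_cons_of_not_prefix _ _ (by simp) _ _ (by simp [List.isPrefixOf]),
                  replace_cons_of_not_prefix _ _ (by simp) _ _ (by simp [List.isPrefixOf]),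
                  replace_cons_of_not_prefix _ _ (by simp) _ _ (by simp [List.isPrefixOf]),
                  replace_cons_of_not_prefix _ _ (by simp) _ _ (by simp [List.isPrefixOf])]
              rfl
            have h3 : passAMP ('&' :: 'a' :: 'm' :: 'p' :: ';' :: passGT (passLT r)) = '&' :: passAMP (passGT (passLT r)) := by
              rw [passAMP, replace_of_prefix _ _ _ (by simp) (by simp [List.isPrefixOf])]
              rfl
            rw [r3, h1, h2, h3]
            rw [unescGo]
            rw [if_neg (by simpa using hlt'), if_neg (by simpa using hgt'),
                if_pos (by simp [List.isPrefixOf])]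
            have hlen : r.length ≤ n := by simp at hs; omega
            simp only [List.drop_succ_cons, List.drop_zero]
            exact congrArg _ (ih r hlen)
          · -- no entity starts here: all three passes keep the head character
            have h1 : passLT (c :: t) = c :: passLT t := by
              rw [passLT, replace_cons_of_not_prefix _ _ (by simp) _ _ hlt]
              rfl
            have hgt' : ¬ (['&', 'g', 't', ';'] : List Char).isPrefixOf (c :: passLT t) = true := by
              simp only [List.isPrefixOf, Bool.and_eq_true, beq_iff_eq]
              rintro ⟨hc, hrest⟩
              have hiff := prefix_replace_iff ['&', 'l', 't', ';'] '<' (by simp)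
                ['g', 't', ';'] (by intro x hx; fin_cases hx <;> exact ⟨by decide, by decide⟩) t
              rw [show PySem.Chars.replace t ['&', 'l', 't', ';'] ['<'] = passLT t from rfl, hrest] at hiff
              apply hgt
              simp only [List.isPrefixOf, Bool.and_eq_true, beq_iff_eq]
              exact ⟨hc, hiff.symm⟩
            have h2 : passGT (c :: passLT t) = c :: passGT (passLT t) := by
              rw [passGT, replace_cons_of_not_prefix _ _ (by simp) _ _ hgt']
              rfl
            have hamp' : ¬ (['&', 'a', 'm', 'p', ';'] : List Char).isPrefixOf (c :: passGT (passLT t)) = true := by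
              simp only [List.isPrefixOf, Bool.and_eq_true, beq_iff_eq]
              rintro ⟨hc, hrest⟩
              have hA := prefix_replace_iff ['&', 'g', 't', ';'] '>' (by simp)
                ['a', 'm', 'p', ';'] (by intro x hx; fin_cases hx <;> exact ⟨by decide, by decide⟩) (passLT t)
              have hB := prefix_replace_iff ['&', 'l', 't', ';'] '<' (by simp)
                ['a', 'm', 'p', ';'] (by intro x hx; fin_cases hx <;> exact ⟨by decide, by decide⟩) t
              rw [show PySem.Chars.replace (passLT t) ['&', 'g', 't', ';'] ['>'] = passGT (passLT t) from rfl, hrest] at hA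
              rw [show PySem.Chars.replace t ['&', 'l', 't', ';'] ['<'] = passLT t from rfl, ← hA] at hB
              apply hamp
              simp only [List.isPrefixOf, Bool.and_eq_true, beq_iff_eq]
              exact ⟨hc, hB.symm⟩
            have h3 : passAMP (c :: passGT (passLT t)) = c :: passAMP (passGT (passLT t)) := by
              rw [passAMP, replace_cons_of_not_prefix _ _ (by simp) _ _ hamp']
              rfl
            rw [r3, h1, h2, h3]
            rw [unescGo]
            rw [if_neg (by simpa using hlt), if_neg (by simpa using hgt), if_neg (by simpa using hamp)]
            have hlen : t.length ≤ n := by simp at hs; omega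
            exact congrArg _ (ih t hlen)

theorem r3_eq (s : List Char) : r3 s = unescGo s := main_ind s.length s (le_refl _)

-- ===== VERDICT (by name: the statement is the Claim_ definition above) =====
theorem unescape_slack_text_spec : Claim_equal_unescape_slack_text := by
  intro text _
  unfold Spec_unescape_slack_text unescape_slack_text unescape_slack_text_alt
  by_cases h : text = ""
  · rw [if_pos h, if_pos h]
  · rw [if_neg h, if_neg h]
    simp only [List.foldl]
    rw [PySem.Str.replace, PySem.Str.replace, PySem.Str.replace]
    rw [← r3_eq]
    simp only [String.toList_ofList]
    rfl
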